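-- pv_equiv track=rewrite | github.com/foie0222/baken-kaigi | backend/src/infrastructure/providers/mock_race_data_provider.py | _calculate_waku_assignments
-- ===== SOURCE A (Python) =====
-- def _calculate_waku_assignments(num_runners: int) -> list[int]:
--     """馬番に対する枠番を計算する（JRA方式）.
--
--     JRAの枠番割り当てルール:
--     - 8頭以下: 馬番=枠番
--     - 9頭以上: 8枠に均等に割り当て、後ろの枠から複数頭になる
--     """
--     if num_runners <= 8:
--         return list(range(1, num_runners + 1))
--
--     # 9頭以上の場合
--     waku_assignments = []
--     extra_horses = num_runners - 8  # 8枠を超える馬の数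
--
--     for horse_num in range(1, num_runners + 1):
--         if num_runners <= 16:
--             # 9-16頭: 後ろの枠から2頭ずつ
--             if horse_num <= (8 - extra_horses):
--                 waku = horse_num
--             else:
--                 waku = 8 - ((num_runners - horse_num) // 2)
--         else:
--             # 17-18頭: より複雑な割り当て
--             if horse_num == 1:
--                 waku = 1
--             elif horse_num == 2:
--                 waku = 2
--             elif horse_num <= 4:
--                 waku = 3
--             elif horse_num <= 6:
--                 waku = 4
--             elif horse_num <= 8:
--                 waku = 5
--             elif horse_num <= 11:
--                 waku = 6
--             elif horse_num <= 14:
--                 waku = 7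
--             else:
--                 waku = 8
--
--         waku_assignments.append(waku)
--
--     return waku_assignments
-- ===== SOURCE B (Python) =====
-- def _calculate_waku_assignments(num_runners: int) -> list[int]:
--     """Per-gate count table instead of per-horse gate computation."""
--     if num_runners <= 8:
--         return list(range(1, num_runners + 1))
--     if num_runners <= 16:
--         extra = num_runners - 8
--         counts = [1] * (8 - extra) + [2] * extra
--     else:
--         counts = [1, 1, 2, 2, 2, 3, 3, num_runners - 14]
--     result = []
--     for gate, count in enumerate(counts, start=1):
--         result.extend([gate] * count)
--     return result
-- ===== Notes on version B (the rewrite author's own statement) =====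
-- stated objective: simpler
-- what changed: B builds a per-gate count table (counts list) and emits each gate number count times via enumerate, instead of A's per-horse loop that computes a gate for every horse number with branch/division logic.
import Mathlib
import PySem

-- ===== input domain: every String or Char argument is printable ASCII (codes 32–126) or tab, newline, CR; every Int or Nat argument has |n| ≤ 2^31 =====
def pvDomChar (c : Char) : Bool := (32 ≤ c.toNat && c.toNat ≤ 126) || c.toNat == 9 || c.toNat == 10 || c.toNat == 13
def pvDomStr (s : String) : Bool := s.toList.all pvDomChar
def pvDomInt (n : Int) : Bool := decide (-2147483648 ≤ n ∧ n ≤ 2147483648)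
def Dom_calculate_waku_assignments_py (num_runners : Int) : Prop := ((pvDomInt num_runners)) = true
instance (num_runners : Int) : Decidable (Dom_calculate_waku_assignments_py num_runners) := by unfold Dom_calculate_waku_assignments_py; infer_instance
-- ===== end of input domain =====

-- B replaces A's per-horse gate computation by a per-gate count table; objective: simpler.

-- ===== PORT A =====
def calculate_waku_assignments_py (num_runners : Int) : List Int :=
  if num_runners ≤ 8 then
    PySem.List.pyRange 1 (num_runners + 1) 1
  else
    let extra_horses := num_runners - 8
    (PySem.List.pyRange 1 (num_runners + 1) 1).foldl (fun acc horse_num =>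
      let waku :=
        if num_runners ≤ 16 then
          if horse_num ≤ 8 - extra_horses then horse_num
          else 8 - PySem.Int.floordiv (num_runners - horse_num) 2
        else
          if horse_num = 1 then 1
          else if horse_num = 2 then 2
          else if horse_num ≤ 4 then 3
          else if horse_num ≤ 6 then 4
          else if horse_num ≤ 8 then 5
          else if horse_num ≤ 11 then 6
          else if horse_num ≤ 14 then 7
          else 8
      acc ++ [waku]) []

-- ===== PORT B =====
def calculate_waku_assignments_py_alt (num_runners : Int) : List Int :=
  if num_runners ≤ 8 then
    PySem.List.pyRange 1 (num_runners + 1) 1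
  else
    let counts : List Int :=
      if num_runners ≤ 16 then
        let extra := num_runners - 8
        List.replicate (8 - extra).toNat 1 ++ List.replicate extra.toNat 2
      else
        [1, 1, 2, 2, 2, 3, 3, num_runners - 14]
    (PySem.List.enumerate counts 1).foldl
      (fun res p => res ++ List.replicate p.2.toNat p.1) []

-- ===== PRECONDITION & SPEC =====
def Spec_calculate_waku_assignments_py (num_runners : Int) (out : List Int) : Prop := out = calculate_waku_assignments_py_alt num_runners
instance (num_runners : Int) (out : List Int) : Decidable (Spec_calculate_waku_assignments_py num_runners out) := by unfold Spec_calculate_waku_assignments_py; infer_instance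

-- ===== CLAIM (what is proved, stated in full; the proofs are below) =====
def Claim_equal_calculate_waku_assignments_py : Prop := ∀ (num_runners : Int), Dom_calculate_waku_assignments_py num_runners → Spec_calculate_waku_assignments_py num_runners (calculate_waku_assignments_py num_runners)

-- ===== LEMMAS AND PROOFS =====

-- A's >16 branch maps horse 1..14 to the fixed gate prefix and every later horse to gate 8
lemma pvMapA (m : Nat) :
    (PySem.List.pyRange 1 (15 + (m : Int)) 1).map (fun horse_num =>
        if horse_num = 1 then (1 : Int)
        else if horse_num = 2 then 2
        else if horse_num ≤ 4 then 3
        else if horse_num ≤ 6 then 4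
        else if horse_num ≤ 8 then 5
        else if horse_num ≤ 11 then 6
        else if horse_num ≤ 14 then 7
        else 8) =
      [1, 2, 3, 3, 4, 4, 5, 5, 6, 6, 6, 7, 7, 7] ++ List.replicate m 8 := by
  induction m with
  | zero => decide
  | succ k ih =>
    have hcast : (15 : Int) + ((k : Int) + 1) = (15 + (k : Int)) + 1 := by ring
    push_cast
    rw [hcast, PySem.List.pyRange_one_succ_right (by omega), List.map_append, ih]
    have hg : (if (15 + (k : Int)) = 1 then (1 : Int)
        else if (15 + (k : Int)) = 2 then 2
        else if (15 + (k : Int)) ≤ 4 then 3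
        else if (15 + (k : Int)) ≤ 6 then 4
        else if (15 + (k : Int)) ≤ 8 then 5
        else if (15 + (k : Int)) ≤ 11 then 6
        else if (15 + (k : Int)) ≤ 14 then 7
        else 8) = 8 := by split_ifs <;> omega
    simp [hg, List.replicate_succ']

theorem calculate_waku_assignments_py_eq_alt :
    ∀ (n : Int), calculate_waku_assignments_py n = calculate_waku_assignments_py_alt n := by
  intro n
  by_cases h8 : n ≤ 8
  · simp [calculate_waku_assignments_py, calculate_waku_assignments_py_alt, h8]
  · by_cases h16 : n ≤ 16
    · -- 9 ≤ n ≤ 16: finitely many values, each checked by evaluation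
      have h9 : 9 ≤ n := by omega
      interval_cases n <;> decide
    · -- n ≥ 17
      simp only [calculate_waku_assignments_py, calculate_waku_assignments_py_alt,
        if_neg h8, if_neg h16]
      rw [PySem.List.foldl_append_singleton_eq_map, List.nil_append]
      have hn : PySem.List.pyRange 1 (n + 1) 1
          = PySem.List.pyRange 1 (15 + (((n - 14).toNat : Nat) : Int)) 1 := by
        congr 1; omega
      rw [hn, pvMapA]
      simp [PySem.List.enumerate_cons, PySem.List.enumerate_nil, List.replicate_succ]

-- ===== VERDICT (by name: the statement is the Claim_ definition above) =====
theorem calculate_waku_assignments_py_spec : Claim_equal_calculate_waku_assignments_py := by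
  intro n _
  unfold Spec_calculate_waku_assignments_py
  exact calculate_waku_assignments_py_eq_alt n
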